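-- pv_equiv track=rewrite | github.com/spring-iitd/plaid | Adv_attack_Isha_codes/Inject_and_modify.py | stuff_bits
-- ===== SOURCE A (Python) =====
-- def stuff_bits(binary_string):
--     """
--     Inserting '1' after every 5 consecutive '0's in the binary string.
--
--     Args:
--         binary_string (str): Binary string to be stuffed.
--
--     Returns:
--         str: Binary string after stuffing.
--
--     """
--     result = ''
--
--     # Initialize a count for consecutive 0's
--     count = 0
--
--     for bit in binary_string:
--
--         # Appending the current bit to the result string
--         result += bit
--
--         # Incrementing the count if the current bit is 0
--         if bit == '0':
--             count += 1
--
--             # Inserting a 1 after 5 consecutive 0's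
--             if count == 5:
--                 result += '1'
--                 # Reseting the count after inserting the 1
--                 count = 0
--         else:
--             # Reseting the count if the current bit is not 0
--             count = 0
--
--     return result
-- ===== SOURCE B (Python) =====
-- def stuff_bits(binary_string):
--     # Leftmost, non-overlapping replacement of each run of five '0's by the
--     # five '0's followed by a stuffed '1' -- exactly the counter-reset rule.
--     return binary_string.replace('00000', '000001')
-- ===== Notes on version B (the rewrite author's own statement) =====
-- stated objective: idiomatic
-- what changed: Replaces the character-by-character loop with its zero-run counter by a single str.replace('00000','000001') call (leftmost non-overlapping pattern substitution).
import Mathlib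
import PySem

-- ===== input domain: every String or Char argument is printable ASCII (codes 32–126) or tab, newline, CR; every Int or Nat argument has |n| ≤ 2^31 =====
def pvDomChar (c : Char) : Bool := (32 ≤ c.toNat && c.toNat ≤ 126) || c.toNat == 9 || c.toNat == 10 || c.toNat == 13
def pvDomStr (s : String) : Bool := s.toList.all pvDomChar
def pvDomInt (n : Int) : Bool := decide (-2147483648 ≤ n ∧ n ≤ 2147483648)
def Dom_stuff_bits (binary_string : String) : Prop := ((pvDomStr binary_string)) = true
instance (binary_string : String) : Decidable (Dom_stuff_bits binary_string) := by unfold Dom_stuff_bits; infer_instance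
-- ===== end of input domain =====

-- B replaces A's character loop with its consecutive-zero counter by a single
-- str.replace('00000','000001') call (leftmost non-overlapping substitution); idiomatic, same value always.

-- ===== PORT A =====
-- one iteration of A's for-loop: append the bit, count zeros, stuff a '1' after five
-- (Python str carried as List Char, per the PySem convention; exact)
def stuffStep (st : List Char × Int) (bit : Char) : List Char × Int :=
  let result := st.1 ++ [bit]
  if bit == '0' then
    let count := st.2 + 1
    if count == 5 then (result ++ ['1'], 0) else (result, count)
  else (result, 0)

def stuff_bits (binary_string : String) : String :=
  String.ofList (binary_string.toList.foldl stuffStep ([], 0)).1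

-- ===== PORT B =====
def stuff_bits_alt (binary_string : String) : String :=
  PySem.Str.replace binary_string "00000" "000001"

-- ===== PRECONDITION & SPEC =====
def Spec_stuff_bits (binary_string : String) (out : String) : Prop := out = stuff_bits_alt binary_string
instance (binary_string : String) (out : String) : Decidable (Spec_stuff_bits binary_string out) := by unfold Spec_stuff_bits; infer_instance

-- ===== CLAIM (what is proved, stated in full; the proofs are below) =====
def Claim_equal_stuff_bits : Prop := ∀ (binary_string : String), Dom_stuff_bits binary_string → Spec_stuff_bits binary_string (stuff_bits binary_string)

-- ===== LEMMAS AND PROOFS =====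

-- leftmost non-overlapping replacement of '00000' by '000001', as a recursion over the characters
def sR : List Char → List Char
  | [] => []
  | c :: t =>
    if ['0','0','0','0','0'].isPrefixOf (c :: t) then
      '0' :: '0' :: '0' :: '0' :: '0' :: '1' :: sR (t.drop 4)
    else c :: sR t
termination_by l => l.length
decreasing_by
· simp only [List.length_drop, List.length_cons]; omega
· simp

-- A's loop body on the remaining characters, given the current zero counter c ≤ 4
def g : Nat → List Char → List Char
  | _, [] => []
  | c, b :: r =>
    if b = '0' then (if c = 4 then '0' :: '1' :: g 0 r else '0' :: g (c + 1) r)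
    else b :: g 0 r

theorem A_loop (l : List Char) : ∀ (res : List Char) (c : Nat), c ≤ 4 →
    (List.foldl stuffStep (res, (c : Int)) l).1 = res ++ g c l := by
  induction l with
  | nil => intro res c hc; simp [g]
  | cons b r ih =>
    intro res c hc
    by_cases hb : b = '0'
    · subst hb
      by_cases hc4 : c = 4
      · subst hc4
        simp only [List.foldl_cons, stuffStep, beq_self_eq_true, if_true]
        have := ih (res ++ ['0'] ++ ['1']) 0 (by omega)
        simpa [g] using this
      · have h5 : ¬((c : Int) + 1 = 5) := by omega
        have hcast : (c : Int) + 1 = ((c + 1 : Nat) : Int) := by push_cast; ring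
        simp only [List.foldl_cons, stuffStep, beq_self_eq_true, if_true]
        rw [if_neg (by simpa using h5), hcast]
        have := ih (res ++ ['0']) (c + 1) (by omega)
        simpa [g, hc4] using this
    · have hbb : (b == '0') = false := beq_eq_false_iff_ne.mpr hb
      simp only [List.foldl_cons, stuffStep, hbb, Bool.false_eq_true, if_false]
      have := ih (res ++ [b]) 0 (by omega)
      simpa [g, hb] using this

theorem sR_skip (c : Nat) (hc : c ≤ 4) (b : Char) (r : List Char) (hb : b ≠ '0') :
    sR (List.replicate c '0' ++ b :: r) = List.replicate c '0' ++ b :: sR r := by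
  have hbb : (('0' : Char) == b) = false := beq_eq_false_iff_ne.mpr (Ne.symm hb)
  interval_cases c <;> simp [sR, List.isPrefixOf, hbb, List.replicate]

theorem sR_zeros (c : Nat) (hc : c ≤ 4) : sR (List.replicate c '0') = List.replicate c '0' := by
  interval_cases c <;> simp [sR, List.isPrefixOf, List.replicate]

theorem g_eq_sR : ∀ (n : Nat) (l : List Char), l.length ≤ n → ∀ c ≤ 4,
    List.replicate c '0' ++ g c l = sR (List.replicate c '0' ++ l) := by
  intro n
  induction n with
  | zero =>
    intro l hl c hc
    have : l = [] := List.eq_nil_of_length_eq_zero (Nat.le_zero.mp hl)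
    subst this
    simp [g, sR_zeros c hc]
  | succ n ih =>
    intro l hl c hc
    match l with
    | [] => simp [g, sR_zeros c hc]
    | b :: r =>
      by_cases hb : b = '0'
      · subst hb
        by_cases hc4 : c = 4
        · subst hc4
          have hpre : sR (List.replicate 4 '0' ++ '0' :: r)
              = '0' :: '0' :: '0' :: '0' :: '0' :: '1' :: sR r := by
            simp [List.replicate, sR, List.isPrefixOf]
          rw [hpre]
          have := ih r (by simp at hl; omega) 0 (by omega)
          simp only [List.replicate, List.nil_append] at this
          simp [g, List.replicate, this]
        · have hrep : List.replicate c '0' ++ '0' :: r = List.replicate (c + 1) '0' ++ r := by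
            rw [List.replicate_succ']; simp
          have hg : g c ('0' :: r) = '0' :: g (c + 1) r := by
            simp [g, hc4]
          rw [hg, hrep, ← ih r (by simp at hl; omega) (c + 1) (by omega)]
          rw [List.replicate_succ']; simp
      · have := ih r (by simp at hl; omega) 0 (by omega)
        simp only [List.replicate, List.nil_append] at this
        rw [sR_skip c hc b r hb]
        simp [g, hb, this]

theorem go_spec : ∀ (fuel : Nat) (l acc : List Char), l.length ≤ fuel →
    PySem.Chars.replace.go ['0','0','0','0','0'] ['0','0','0','0','0','1'] fuel l acc
      = acc.reverse ++ sR l := by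
  intro fuel
  induction fuel with
  | zero =>
    intro l acc hl
    have : l = [] := List.eq_nil_of_length_eq_zero (Nat.le_zero.mp hl)
    subst this
    simp [PySem.Chars.replace.go, sR]
  | succ n ih =>
    intro l acc hl
    match l with
    | [] => simp [PySem.Chars.replace.go, sR]
    | c :: t =>
      by_cases hp : ['0','0','0','0','0'].isPrefixOf (c :: t)
      · have hgo : PySem.Chars.replace.go ['0','0','0','0','0'] ['0','0','0','0','0','1']
            (n + 1) (c :: t) acc
            = PySem.Chars.replace.go ['0','0','0','0','0'] ['0','0','0','0','0','1']
              n ((c :: t).drop 5) (['0','0','0','0','0','1'].reverse ++ acc) := by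
          simp [PySem.Chars.replace.go, hp]
        rw [hgo]
        have hdrop : (c :: t).drop 5 = t.drop 4 := rfl
        rw [hdrop, ih (t.drop 4) _ (by simp at hl ⊢; omega)]
        have hsr : sR (c :: t) = '0' :: '0' :: '0' :: '0' :: '0' :: '1' :: sR (t.drop 4) := by
          rw [sR]; simp [hp]
        rw [hsr]; simp
      · have hgo : PySem.Chars.replace.go ['0','0','0','0','0'] ['0','0','0','0','0','1']
            (n + 1) (c :: t) acc
            = PySem.Chars.replace.go ['0','0','0','0','0'] ['0','0','0','0','0','1']
              n t (c :: acc) := by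
          simp [PySem.Chars.replace.go, hp]
        rw [hgo, ih t (c :: acc) (by simp at hl; omega)]
        have hsr : sR (c :: t) = c :: sR t := by rw [sR]; simp [hp]
        rw [hsr]; simp

theorem replace_eq_sR (l : List Char) :
    PySem.Chars.replace l ['0','0','0','0','0'] ['0','0','0','0','0','1'] = sR l := by
  rw [PySem.Chars.replace]
  simp only [List.isEmpty_cons, Bool.false_eq_true, if_false]
  simpa using go_spec l.length l [] le_rfl

-- ===== VERDICT (by name: the statement is the Claim_ definition above) =====
theorem stuff_bits_spec : Claim_equal_stuff_bits := by
  intro s _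
  unfold Spec_stuff_bits stuff_bits stuff_bits_alt PySem.Str.replace
  have hA := A_loop s.toList [] 0 (by omega)
  simp only [Nat.cast_zero] at hA
  rw [hA]
  have h00000 : (String.toList "00000") = ['0','0','0','0','0'] := by decide
  have h000001 : (String.toList "000001") = ['0','0','0','0','0','1'] := by decide
  rw [h00000, h000001, replace_eq_sR]
  have := g_eq_sR s.toList.length s.toList le_rfl 0 (by omega)
  simp only [List.replicate, List.nil_append] at this
  rw [this, List.nil_append]
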